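-- pv_equiv track=rewrite | github.com/smilstea/IOS-XR-Maintenance-Window-Checker | ios_xr_mw_comparer.py | show_mpls_traffic_eng_tunnels_p2mp_totals
-- ===== SOURCE A (Python) =====
-- def show_mpls_traffic_eng_tunnels_p2mp_totals(sh_cmd_dict):
--     ###__author__     = "Sam Milstead"
--     ###__copyright__  = "Copyright 2020 (C) Cisco TAC"
--     ###__version__    = "1.1.1"
--     ###__status__     = "alpha"
--     #Perform some magic on the pre and post lines of output for show mpls traffic-eng tunnels p2mp
--     #Each line being an item in a list
--     #Determine how many tunnels there are
--     counters = {'Total Tunnels': 0, 'Total Admin Up Tunnels': 0, 'Total Oper Up Tunnels': 0, 'Total Destinations': 0,'Total Up Destinations': 0, 'Total Any Other State Destinations':0}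
--     for key in sh_cmd_dict:
--         counters['Total Tunnels'] += 1
--         for value in sh_cmd_dict[key]:
--             if value ==  'Admin State':
--                 if sh_cmd_dict[key][value] == 'up':
--                     counters['Total Admin Up Tunnels'] += 1
--             elif value ==  'Oper State':
--                 if sh_cmd_dict[key][value] == 'up':
--                     counters['Total Oper Up Tunnels'] += 1
--             elif 'Destination' in value:
--                 counters['Total Destinations'] += 1
--                 if sh_cmd_dict[key][value] == 'Up':
--                     counters['Total Up Destinations'] += 1
--                 else:
--                     counters['Total Any Other State Destinations'] += 1
--     return counters
-- ===== SOURCE B (Python) =====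
-- def show_mpls_traffic_eng_tunnels_p2mp_totals(sh_cmd_dict):
--     values = list(sh_cmd_dict.values())
--     total = len(values)
--     admin_up = sum(1 for v in values if v.get('Admin State') == 'up')
--     oper_up = sum(1 for v in values if v.get('Oper State') == 'up')
--     dests = sum(1 for v in values for k in v if 'Destination' in k)
--     up_dests = sum(1 for v in values for k in v if 'Destination' in k and v[k] == 'Up')
--     return {'Total Tunnels': total, 'Total Admin Up Tunnels': admin_up,
--             'Total Oper Up Tunnels': oper_up, 'Total Destinations': dests,
--             'Total Up Destinations': up_dests,
--             'Total Any Other State Destinations': dests - up_dests}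
-- ===== Notes on version B (the rewrite author's own statement) =====
-- stated objective: simpler
-- what changed: Replaces A's single interleaved loop that threads one mutable six-counter dict through nested branch updates with six independent passes (len plus sum-comprehensions over the values), deriving the 'other state' count by subtraction.
import Mathlib
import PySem

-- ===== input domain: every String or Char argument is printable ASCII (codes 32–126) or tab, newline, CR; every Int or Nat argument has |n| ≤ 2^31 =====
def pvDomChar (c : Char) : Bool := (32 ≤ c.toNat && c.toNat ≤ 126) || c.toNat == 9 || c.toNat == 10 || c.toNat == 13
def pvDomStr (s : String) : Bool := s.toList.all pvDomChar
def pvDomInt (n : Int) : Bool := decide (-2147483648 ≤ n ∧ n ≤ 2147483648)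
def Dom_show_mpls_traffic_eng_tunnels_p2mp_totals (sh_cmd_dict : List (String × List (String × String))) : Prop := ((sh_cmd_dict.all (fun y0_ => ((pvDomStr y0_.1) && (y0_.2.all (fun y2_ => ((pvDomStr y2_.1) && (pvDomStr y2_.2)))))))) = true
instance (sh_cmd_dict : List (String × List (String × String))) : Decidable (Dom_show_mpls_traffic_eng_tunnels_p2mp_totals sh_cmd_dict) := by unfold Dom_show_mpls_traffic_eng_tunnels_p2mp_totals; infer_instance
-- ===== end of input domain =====

-- B replaces A's single interleaved loop threading one mutable six-counter dict through nested
-- branch updates with six independent passes over the values (len + sum-comprehensions),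
-- deriving the 'other state' count by subtraction (objective: simpler).
-- Both ports first decode the association-list argument as the Python dict A receives
-- (PySem.Dict.ofList on the outer list and on each inner list: last duplicate wins, first position kept).

-- ===== PORT A =====
-- the inner 'for value in sh_cmd_dict[key]' loop body of A
def pvAInnerStep (inner : PySem.Dict String String) (c : PySem.Dict String Int) (value : String) : PySem.Dict String Int :=
  if value == "Admin State" then
    (if inner.getD value "" == "up" then c.modify "Total Admin Up Tunnels" 0 (· + 1) else c)
  else if value == "Oper State" then
    (if inner.getD value "" == "up" then c.modify "Total Oper Up Tunnels" 0 (· + 1) else c)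
  else if PySem.Str.isIn "Destination" value then
    (let c := c.modify "Total Destinations" 0 (· + 1)
     if inner.getD value "" == "Up" then c.modify "Total Up Destinations" 0 (· + 1)
     else c.modify "Total Any Other State Destinations" 0 (· + 1))
  else c

-- the outer 'for key in sh_cmd_dict' loop body of A
def pvAOuterStep (d : PySem.Dict String (PySem.Dict String String)) (c : PySem.Dict String Int) (key : String) : PySem.Dict String Int :=
  (d.getD key PySem.Dict.empty).keys.foldl (pvAInnerStep (d.getD key PySem.Dict.empty)) (c.modify "Total Tunnels" 0 (· + 1))

def show_mpls_traffic_eng_tunnels_p2mp_totals (sh_cmd_dict : List (String × List (String × String))) : List (String × Int) :=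
  let d : PySem.Dict String (PySem.Dict String String) :=
    PySem.Dict.ofList (sh_cmd_dict.map (fun p => (p.1, PySem.Dict.ofList p.2)))
  let counters : PySem.Dict String Int :=
    (((((PySem.Dict.empty.insert "Total Tunnels" 0).insert "Total Admin Up Tunnels" 0).insert
        "Total Oper Up Tunnels" 0).insert "Total Destinations" 0).insert
        "Total Up Destinations" 0).insert "Total Any Other State Destinations" 0
  (d.keys.foldl (pvAOuterStep d) counters).items

-- ===== PORT B =====
def show_mpls_traffic_eng_tunnels_p2mp_totals_alt (sh_cmd_dict : List (String × List (String × String))) : List (String × Int) :=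
  let d : PySem.Dict String (PySem.Dict String String) :=
    PySem.Dict.ofList (sh_cmd_dict.map (fun p => (p.1, PySem.Dict.ofList p.2)))
  let vs := d.values
  let total : Int := vs.length
  let adminUp : Int := (vs.countP (fun v => v.get? "Admin State" == some "up") : Int)
  let operUp : Int := (vs.countP (fun v => v.get? "Oper State" == some "up") : Int)
  let dests : Int := (vs.map (fun v => ((v.keys.countP (fun k => PySem.Str.isIn "Destination" k)) : Int))).sum
  let upDests : Int := (vs.map (fun v => ((v.keys.countP (fun k => PySem.Str.isIn "Destination" k && v.getD k "" == "Up")) : Int))).sum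
  [("Total Tunnels", total), ("Total Admin Up Tunnels", adminUp), ("Total Oper Up Tunnels", operUp),
   ("Total Destinations", dests), ("Total Up Destinations", upDests),
   ("Total Any Other State Destinations", dests - upDests)]

-- ===== PRECONDITION & SPEC =====
def Spec_show_mpls_traffic_eng_tunnels_p2mp_totals (sh_cmd_dict : List (String × List (String × String))) (out : List (String × Int)) : Prop := out = show_mpls_traffic_eng_tunnels_p2mp_totals_alt sh_cmd_dict
instance (sh_cmd_dict : List (String × List (String × String))) (out : List (String × Int)) : Decidable (Spec_show_mpls_traffic_eng_tunnels_p2mp_totals sh_cmd_dict out) := by unfold Spec_show_mpls_traffic_eng_tunnels_p2mp_totals; infer_instance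

-- ===== CLAIM (what is proved, stated in full; the proofs are below) =====
def Claim_equal_show_mpls_traffic_eng_tunnels_p2mp_totals : Prop := ∀ (sh_cmd_dict : List (String × List (String × String))), Dom_show_mpls_traffic_eng_tunnels_p2mp_totals sh_cmd_dict → Spec_show_mpls_traffic_eng_tunnels_p2mp_totals sh_cmd_dict (show_mpls_traffic_eng_tunnels_p2mp_totals sh_cmd_dict)

-- ===== LEMMAS AND PROOFS =====

-- the six counter keys, in insertion order
def pvSix : List String := ["Total Tunnels", "Total Admin Up Tunnels", "Total Oper Up Tunnels", "Total Destinations", "Total Up Destinations", "Total Any Other State Destinations"]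

-- predicates describing which inner keys make A bump each counter
def pvQdest (k : String) : Bool := !(k == "Admin State") && !(k == "Oper State") && PySem.Str.isIn "Destination" k
def pvQadmin (inner : PySem.Dict String String) (k : String) : Bool := (k == "Admin State") && (inner.getD k "" == "up")
def pvQoper (inner : PySem.Dict String String) (k : String) : Bool := (k == "Oper State") && (inner.getD k "" == "up")
def pvQup (inner : PySem.Dict String String) (k : String) : Bool := pvQdest k && (inner.getD k "" == "Up")
def pvQother (inner : PySem.Dict String String) (k : String) : Bool := pvQdest k && !(inner.getD k "" == "Up")

-- fold a step whose effect on the K-entry is '+ g x'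
lemma pv_getD_foldl {α : Type} (step : PySem.Dict String Int → α → PySem.Dict String Int)
    (g : α → Int) (K : String)
    (h : ∀ c x, (step c x).getD K 0 = c.getD K 0 + g x) (l : List α) :
    ∀ c : PySem.Dict String Int, (l.foldl step c).getD K 0 = c.getD K 0 + (l.map g).sum := by
  induction l with
  | nil => intro c; simp
  | cons x t ih => intro c; simp [List.foldl_cons, ih, h, add_assoc]

-- effect of A's inner loop body on each counter entry
lemma pv_step_TT (inner : PySem.Dict String String) (c : PySem.Dict String Int) (v : String) :
    (pvAInnerStep inner c v).getD "Total Tunnels" 0 = c.getD "Total Tunnels" 0 + 0 := by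
  unfold pvAInnerStep
  split_ifs <;> simp [PySem.Dict.getD_modify]

lemma pv_step_TAU (inner : PySem.Dict String String) (c : PySem.Dict String Int) (v : String) :
    (pvAInnerStep inner c v).getD "Total Admin Up Tunnels" 0
      = c.getD "Total Admin Up Tunnels" 0 + (if pvQadmin inner v then 1 else 0) := by
  unfold pvAInnerStep pvQadmin
  split_ifs with h1 h2 <;> simp_all [PySem.Dict.getD_modify]

lemma pv_step_TOU (inner : PySem.Dict String String) (c : PySem.Dict String Int) (v : String) :
    (pvAInnerStep inner c v).getD "Total Oper Up Tunnels" 0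
      = c.getD "Total Oper Up Tunnels" 0 + (if pvQoper inner v then 1 else 0) := by
  unfold pvAInnerStep pvQoper
  split_ifs with h1 h2 <;> simp_all [PySem.Dict.getD_modify]

lemma pv_step_TD (inner : PySem.Dict String String) (c : PySem.Dict String Int) (v : String) :
    (pvAInnerStep inner c v).getD "Total Destinations" 0
      = c.getD "Total Destinations" 0 + (if pvQdest v then 1 else 0) := by
  unfold pvAInnerStep pvQdest
  split_ifs with h1 h2 h3 <;> simp_all [PySem.Dict.getD_modify]

lemma pv_step_TU (inner : PySem.Dict String String) (c : PySem.Dict String Int) (v : String) :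
    (pvAInnerStep inner c v).getD "Total Up Destinations" 0
      = c.getD "Total Up Destinations" 0 + (if pvQup inner v then 1 else 0) := by
  unfold pvAInnerStep pvQup pvQdest
  split_ifs with h1 h2 h3 <;> simp_all [PySem.Dict.getD_modify]

lemma pv_step_TO (inner : PySem.Dict String String) (c : PySem.Dict String Int) (v : String) :
    (pvAInnerStep inner c v).getD "Total Any Other State Destinations" 0
      = c.getD "Total Any Other State Destinations" 0 + (if pvQother inner v then 1 else 0) := by
  unfold pvAInnerStep pvQother pvQdest
  split_ifs with h1 h2 h3 <;> simp_all [PySem.Dict.getD_modify]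

-- effect of A's inner loop (over inner.keys) on each counter entry
lemma pv_inner_TT (inner : PySem.Dict String String) (c : PySem.Dict String Int) :
    (inner.keys.foldl (pvAInnerStep inner) c).getD "Total Tunnels" 0 = c.getD "Total Tunnels" 0 := by
  have := pv_getD_foldl (pvAInnerStep inner) (fun _ => 0) "Total Tunnels" (pv_step_TT inner) inner.keys c
  simpa using this

lemma pv_inner_cnt (inner : PySem.Dict String String) (c : PySem.Dict String Int) (K : String)
    (q : String → Bool)
    (hstep : ∀ c v, (pvAInnerStep inner c v).getD K 0 = c.getD K 0 + (if q v then 1 else 0)) :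
    (inner.keys.foldl (pvAInnerStep inner) c).getD K 0 = c.getD K 0 + (inner.keys.countP q : Int) := by
  rw [pv_getD_foldl (pvAInnerStep inner) (fun v => if q v then 1 else 0) K hstep inner.keys c]
  rw [PySem.List.sum_map_ite_one_zero]

-- effect of A's outer loop body on each counter entry
lemma pv_outer_TT (d : PySem.Dict String (PySem.Dict String String)) (c : PySem.Dict String Int) (key : String) :
    (pvAOuterStep d c key).getD "Total Tunnels" 0 = c.getD "Total Tunnels" 0 + 1 := by
  unfold pvAOuterStep
  rw [pv_inner_TT, PySem.Dict.getD_modify]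
  simp

lemma pv_outer_cnt (d : PySem.Dict String (PySem.Dict String String)) (c : PySem.Dict String Int)
    (key : String) (K : String) (hK : K ≠ "Total Tunnels")
    (q : PySem.Dict String String → String → Bool)
    (hstep : ∀ inner c v, (pvAInnerStep inner c v).getD K 0 = c.getD K 0 + (if q inner v then 1 else 0)) :
    (pvAOuterStep d c key).getD K 0
      = c.getD K 0 + ((d.getD key PySem.Dict.empty).keys.countP (q (d.getD key PySem.Dict.empty)) : Int) := by
  unfold pvAOuterStep
  rw [pv_inner_cnt _ _ K _ (hstep _), PySem.Dict.getD_modify]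
  simp [hK]

-- A's whole outer fold, entry by entry
lemma pv_fold_TT (d : PySem.Dict String (PySem.Dict String String)) (c : PySem.Dict String Int) :
    (d.keys.foldl (pvAOuterStep d) c).getD "Total Tunnels" 0
      = c.getD "Total Tunnels" 0 + (d.keys.map (fun _ => (1 : Int))).sum := by
  exact pv_getD_foldl (pvAOuterStep d) (fun _ => 1) _ (pv_outer_TT d) d.keys c

lemma pv_fold_cnt (d : PySem.Dict String (PySem.Dict String String)) (c : PySem.Dict String Int)
    (K : String) (hK : K ≠ "Total Tunnels")
    (q : PySem.Dict String String → String → Bool)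
    (hstep : ∀ inner c v, (pvAInnerStep inner c v).getD K 0 = c.getD K 0 + (if q inner v then 1 else 0)) :
    (d.keys.foldl (pvAOuterStep d) c).getD K 0
      = c.getD K 0 + (d.keys.map (fun key => (((d.getD key PySem.Dict.empty).keys.countP (q (d.getD key PySem.Dict.empty)) : Nat) : Int))).sum := by
  exact pv_getD_foldl (pvAOuterStep d) _ K (fun c key => pv_outer_cnt d c key K hK q hstep) d.keys c

-- a sum over d.keys of a function of the looked-up value IS a sum over d.values
lemma pv_sum_keys_values (d : PySem.Dict String (PySem.Dict String String)) (hnd : d.keys.Nodup)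
    (F : PySem.Dict String String → Int) :
    (d.keys.map (fun key => F (d.getD key PySem.Dict.empty))).sum = (d.values.map F).sum := by
  rw [PySem.Dict.values_eq_map_keys d hnd PySem.Dict.empty, List.map_map]
  rfl

-- counting 'k == K && q k' over a duplicate-free list is a membership test
lemma pv_countP_single (K : String) (q : String → Bool) (l : List String) (h : l.Nodup) :
    l.countP (fun k => (k == K) && q k) = if K ∈ l ∧ q K = true then 1 else 0 := by
  induction l with
  | nil => simp
  | cons a t ih =>
    have hna := (List.nodup_cons.mp h).1
    have ht := (List.nodup_cons.mp h).2
    rw [List.countP_cons, ih ht]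
    by_cases hak : a = K
    · subst hak
      have hnt : a ∉ t := hna
      by_cases hq : q a = true <;> simp [hq, hnt]
    · have : (K ∈ a :: t ∧ q K = true) ↔ (K ∈ t ∧ q K = true) := by
        simp [List.mem_cons, Ne.symm hak]
      rw [if_congr this rfl rfl]
      simp [hak]

-- per-tunnel: A's "Admin State"/"Oper State" counting is B's get? test (keys duplicate-free)
lemma pv_cnt_state (v : PySem.Dict String String) (h : v.keys.Nodup) (K W : String) :
    (((v.keys.countP (fun k => (k == K) && (v.getD k "" == W))) : Nat) : Int)
      = if v.get? K == some W then 1 else 0 := by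
  rw [pv_countP_single K (fun k => v.getD k "" == W) v.keys h]
  cases hv : v.get? K with
  | none =>
    have hmem : K ∉ v.keys := (PySem.Dict.get?_eq_none_iff_not_mem_keys v K).mp hv
    simp [hmem]
  | some w =>
    have hmem : K ∈ v.keys := by
      by_contra hno
      rw [(PySem.Dict.get?_eq_none_iff_not_mem_keys v K).mpr hno] at hv
      cases hv
    have hget : v.getD K "" = w := PySem.Dict.getD_of_get?_eq_some v "" hv
    by_cases hw : w = W <;> simp [hmem, hget, hw]

-- A's elif guards are redundant for destination keys ("Destination" is in neither state key)
lemma pv_dest_not_state (k : String) (h : PySem.Str.isIn "Destination" k = true) :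
    (k == "Admin State") = false ∧ (k == "Oper State") = false := by
  constructor <;> (rw [beq_eq_false_iff_ne]; rintro rfl)
  · exact absurd h (by decide)
  · exact absurd h (by decide)

lemma pv_cnt_dest (v : PySem.Dict String String) :
    v.keys.countP pvQdest = v.keys.countP (fun k => PySem.Str.isIn "Destination" k) := by
  apply List.countP_congr
  intro k _
  unfold pvQdest
  cases hIs : PySem.Str.isIn "Destination" k with
  | false => simp
  | true =>
    obtain ⟨h1, h2⟩ := pv_dest_not_state k hIs
    simp [h1, h2]

lemma pv_cnt_up (v : PySem.Dict String String) :
    v.keys.countP (pvQup v) = v.keys.countP (fun k => PySem.Str.isIn "Destination" k && v.getD k "" == "Up") := by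
  apply List.countP_congr
  intro k _
  unfold pvQup pvQdest
  cases hIs : PySem.Str.isIn "Destination" k with
  | false => simp
  | true =>
    obtain ⟨h1, h2⟩ := pv_dest_not_state k hIs
    simp [h1, h2]

-- counting a predicate splits into the 'Up' part and the rest
lemma pv_countP_partition {α : Type} (l : List α) (p q : α → Bool) :
    l.countP p = l.countP (fun x => p x && q x) + l.countP (fun x => p x && !q x) := by
  induction l with
  | nil => simp
  | cons a t ih =>
    rw [List.countP_cons, List.countP_cons, List.countP_cons, ih]
    by_cases hp : p a = true <;> by_cases hq : q a = true <;> simp [hp, hq] <;> omega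

lemma pv_cnt_other (v : PySem.Dict String String) :
    ((v.keys.countP (pvQother v) : Nat) : Int)
      = ((v.keys.countP (fun k => PySem.Str.isIn "Destination" k) : Nat) : Int)
        - ((v.keys.countP (fun k => PySem.Str.isIn "Destination" k && v.getD k "" == "Up") : Nat) : Int) := by
  have hpart := pv_countP_partition v.keys pvQdest (fun k => v.getD k "" == "Up")
  have h1 : v.keys.countP (fun k => pvQdest k && (v.getD k "" == "Up")) = v.keys.countP (pvQup v) := by
    apply List.countP_congr; intro k _; simp [pvQup]
  have h2 : v.keys.countP (fun k => pvQdest k && !(v.getD k "" == "Up")) = v.keys.countP (pvQother v) := by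
    apply List.countP_congr; intro k _; simp [pvQother]
  rw [h1, h2] at hpart
  rw [← pv_cnt_dest, ← pv_cnt_up]
  omega

lemma pv_sum_map_sub {α : Type} (xs : List α) (f g : α → Int) :
    (xs.map (fun x => f x - g x)).sum = (xs.map f).sum - (xs.map g).sum := by
  induction xs with
  | nil => simp
  | cons a t ih => simp [ih]; ring

-- A's counter updates never add or remove keys
lemma pv_mod_keys (c : PySem.Dict String Int) (K : String) (hK : K ∈ pvSix) (h : c.keys = pvSix) :
    (c.modify K 0 (· + 1)).keys = pvSix := by
  have hc : c.contains K = true := by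
    rw [PySem.Dict.contains_eq_decide_mem_keys, h]
    exact decide_eq_true hK
  rw [PySem.Dict.keys_modify, PySem.Dict.keys_insert_of_contains _ _ hc, h]

lemma pv_keys_innerStep (inner : PySem.Dict String String) (c : PySem.Dict String Int) (v : String)
    (h : c.keys = pvSix) : (pvAInnerStep inner c v).keys = pvSix := by
  unfold pvAInnerStep
  split_ifs <;>
    first
      | exact h
      | exact pv_mod_keys c _ (by simp [pvSix]) h
      | exact pv_mod_keys _ _ (by simp [pvSix]) (pv_mod_keys c _ (by simp [pvSix]) h)

lemma pv_keys_foldl {α : Type} (step : PySem.Dict String Int → α → PySem.Dict String Int)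
    (hstep : ∀ c x, c.keys = pvSix → (step c x).keys = pvSix) (l : List α) :
    ∀ c, c.keys = pvSix → (l.foldl step c).keys = pvSix := by
  induction l with
  | nil => intro c h; exact h
  | cons x t ih => intro c h; exact ih _ (hstep c x h)

lemma pv_keys_outerStep (d : PySem.Dict String (PySem.Dict String String)) (c : PySem.Dict String Int)
    (key : String) (h : c.keys = pvSix) : (pvAOuterStep d c key).keys = pvSix := by
  unfold pvAOuterStep
  exact pv_keys_foldl _ (pv_keys_innerStep _) _ _ (pv_mod_keys c _ (by simp [pvSix]) h)

-- every value of the decoded outer dict is itself a decoded dict, hence has duplicate-free keys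
lemma pv_values_nodup_aux (l : List (String × List (String × String)))
    (d : PySem.Dict String (PySem.Dict String String))
    (hd : ∀ v ∈ d.values, v.keys.Nodup) :
    ∀ v ∈ (l.foldl (fun acc p => acc.insert p.1 (PySem.Dict.ofList p.2)) d).values, v.keys.Nodup := by
  induction l generalizing d with
  | nil => exact hd
  | cons p t ih =>
    intro v hv
    refine ih _ ?_ v hv
    intro w hw
    rcases PySem.Dict.mem_values_insert d p.1 (PySem.Dict.ofList p.2) w hw with h | h
    · subst h; exact PySem.Dict.nodup_keys_ofList p.2
    · exact hd w h

lemma pv_values_nodup (l : List (String × List (String × String))) :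
    ∀ v ∈ (PySem.Dict.ofList (l.map (fun p => (p.1, PySem.Dict.ofList p.2)))).values, v.keys.Nodup := by
  have hrw : PySem.Dict.ofList (l.map (fun p => (p.1, PySem.Dict.ofList p.2)))
      = l.foldl (fun acc p => acc.insert p.1 (PySem.Dict.ofList p.2)) PySem.Dict.empty := by
    simp [PySem.Dict.ofList, PySem.Dict.update, List.foldl_map]
  rw [hrw]
  exact pv_values_nodup_aux l PySem.Dict.empty (by simp [PySem.Dict.empty, PySem.Dict.values])

-- the assembled result of A's fold, entry by entry, equals B's list
lemma pv_main (d : PySem.Dict String (PySem.Dict String String)) (hnd : d.keys.Nodup)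
    (hv : ∀ v ∈ d.values, v.keys.Nodup) :
    (d.keys.foldl (pvAOuterStep d)
      ((((((PySem.Dict.empty.insert "Total Tunnels" 0).insert "Total Admin Up Tunnels" 0).insert
        "Total Oper Up Tunnels" 0).insert "Total Destinations" 0).insert
        "Total Up Destinations" 0).insert "Total Any Other State Destinations" (0 : Int))).items
    = [("Total Tunnels", (d.values.length : Int)),
       ("Total Admin Up Tunnels", (d.values.countP (fun v => v.get? "Admin State" == some "up") : Int)),
       ("Total Oper Up Tunnels", (d.values.countP (fun v => v.get? "Oper State" == some "up") : Int)),
       ("Total Destinations", (d.values.map (fun v => ((v.keys.countP (fun k => PySem.Str.isIn "Destination" k)) : Int))).sum),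
       ("Total Up Destinations", (d.values.map (fun v => ((v.keys.countP (fun k => PySem.Str.isIn "Destination" k && v.getD k "" == "Up")) : Int))).sum),
       ("Total Any Other State Destinations",
         (d.values.map (fun v => ((v.keys.countP (fun k => PySem.Str.isIn "Destination" k)) : Int))).sum
           - (d.values.map (fun v => ((v.keys.countP (fun k => PySem.Str.isIn "Destination" k && v.getD k "" == "Up")) : Int))).sum)] := by
  set c0 : PySem.Dict String Int :=
    (((((PySem.Dict.empty.insert "Total Tunnels" 0).insert "Total Admin Up Tunnels" 0).insert
        "Total Oper Up Tunnels" 0).insert "Total Destinations" 0).insert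
        "Total Up Destinations" 0).insert "Total Any Other State Destinations" (0 : Int) with hc0def
  set r := d.keys.foldl (pvAOuterStep d) c0 with hrdef
  have hc0 : c0.keys = pvSix := by rw [hc0def]; decide
  have hk : r.keys = pvSix := pv_keys_foldl _ (pv_keys_outerStep d) _ c0 hc0
  have hnd6 : r.keys.Nodup := by rw [hk]; decide
  -- entry 1: Total Tunnels
  have e1 : r.getD "Total Tunnels" 0 = (d.values.length : Int) := by
    rw [hrdef, pv_fold_TT]
    have : c0.getD "Total Tunnels" 0 = 0 := by rw [hc0def]; decide
    rw [this]
    have hs : ∀ (l : List String), (l.map (fun _ => (1 : Int))).sum = (l.length : Int) :=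
      fun l => by simp [List.map_const', List.sum_replicate]
    rw [hs]
    simp [PySem.Dict.keys, PySem.Dict.values]
  -- entry 2: Total Admin Up Tunnels
  have e2 : r.getD "Total Admin Up Tunnels" 0 = (d.values.countP (fun v => v.get? "Admin State" == some "up") : Int) := by
    rw [hrdef, pv_fold_cnt d c0 "Total Admin Up Tunnels" (by decide) pvQadmin pv_step_TAU]
    have h0 : c0.getD "Total Admin Up Tunnels" 0 = 0 := by rw [hc0def]; decide
    rw [h0, pv_sum_keys_values d hnd (fun v => ((v.keys.countP (pvQadmin v) : Nat) : Int))]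
    have hmap : ∀ v ∈ d.values, ((v.keys.countP (pvQadmin v) : Nat) : Int) = if v.get? "Admin State" == some "up" then 1 else 0 :=
      fun v hv' => pv_cnt_state v (hv v hv') "Admin State" "up"
    rw [List.map_congr_left hmap, PySem.List.sum_map_ite_one_zero]
    simp
  -- entry 3: Total Oper Up Tunnels
  have e3 : r.getD "Total Oper Up Tunnels" 0 = (d.values.countP (fun v => v.get? "Oper State" == some "up") : Int) := by
    rw [hrdef, pv_fold_cnt d c0 "Total Oper Up Tunnels" (by decide) pvQoper pv_step_TOU]
    have h0 : c0.getD "Total Oper Up Tunnels" 0 = 0 := by rw [hc0def]; decide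
    rw [h0, pv_sum_keys_values d hnd (fun v => ((v.keys.countP (pvQoper v) : Nat) : Int))]
    have hmap : ∀ v ∈ d.values, ((v.keys.countP (pvQoper v) : Nat) : Int) = if v.get? "Oper State" == some "up" then 1 else 0 :=
      fun v hv' => pv_cnt_state v (hv v hv') "Oper State" "up"
    rw [List.map_congr_left hmap, PySem.List.sum_map_ite_one_zero]
    simp
  -- entry 4: Total Destinations
  have e4 : r.getD "Total Destinations" 0 = (d.values.map (fun v => ((v.keys.countP (fun k => PySem.Str.isIn "Destination" k)) : Int))).sum := by
    rw [hrdef, pv_fold_cnt d c0 "Total Destinations" (by decide) (fun _ => pvQdest) pv_step_TD]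
    have h0 : c0.getD "Total Destinations" 0 = 0 := by rw [hc0def]; decide
    rw [h0, pv_sum_keys_values d hnd (fun v => ((v.keys.countP pvQdest : Nat) : Int))]
    have hmap : ∀ v ∈ d.values, ((v.keys.countP pvQdest : Nat) : Int) = ((v.keys.countP (fun k => PySem.Str.isIn "Destination" k) : Nat) : Int) :=
      fun v _ => by exact_mod_cast congrArg Nat.cast (pv_cnt_dest v)
    rw [List.map_congr_left hmap]
    simp
  -- entry 5: Total Up Destinations
  have e5 : r.getD "Total Up Destinations" 0 = (d.values.map (fun v => ((v.keys.countP (fun k => PySem.Str.isIn "Destination" k && v.getD k "" == "Up")) : Int))).sum := by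
    rw [hrdef, pv_fold_cnt d c0 "Total Up Destinations" (by decide) pvQup pv_step_TU]
    have h0 : c0.getD "Total Up Destinations" 0 = 0 := by rw [hc0def]; decide
    rw [h0, pv_sum_keys_values d hnd (fun v => ((v.keys.countP (pvQup v) : Nat) : Int))]
    have hmap : ∀ v ∈ d.values, ((v.keys.countP (pvQup v) : Nat) : Int) = ((v.keys.countP (fun k => PySem.Str.isIn "Destination" k && v.getD k "" == "Up") : Nat) : Int) :=
      fun v _ => by exact_mod_cast congrArg Nat.cast (pv_cnt_up v)
    rw [List.map_congr_left hmap]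
    simp
  -- entry 6: Total Any Other State Destinations
  have e6 : r.getD "Total Any Other State Destinations" 0
      = (d.values.map (fun v => ((v.keys.countP (fun k => PySem.Str.isIn "Destination" k)) : Int))).sum
        - (d.values.map (fun v => ((v.keys.countP (fun k => PySem.Str.isIn "Destination" k && v.getD k "" == "Up")) : Int))).sum := by
    rw [hrdef, pv_fold_cnt d c0 "Total Any Other State Destinations" (by decide) pvQother pv_step_TO]
    have h0 : c0.getD "Total Any Other State Destinations" 0 = 0 := by rw [hc0def]; decide
    rw [h0, pv_sum_keys_values d hnd (fun v => ((v.keys.countP (pvQother v) : Nat) : Int))]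
    have hmap : ∀ v ∈ d.values, ((v.keys.countP (pvQother v) : Nat) : Int)
        = (fun v => ((v.keys.countP (fun k => PySem.Str.isIn "Destination" k) : Nat) : Int)
            - ((v.keys.countP (fun k => PySem.Str.isIn "Destination" k && v.getD k "" == "Up") : Nat) : Int)) v :=
      fun v _ => pv_cnt_other v
    rw [List.map_congr_left hmap, pv_sum_map_sub]
    simp
  rw [PySem.Dict.items_eq_map_keys r hnd6 0, hk]
  simp only [pvSix, List.map_cons, List.map_nil]
  rw [e1, e2, e3, e4, e5, e6]

-- ===== VERDICT (by name: the statement is the Claim_ definition above) =====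
theorem show_mpls_traffic_eng_tunnels_p2mp_totals_spec : Claim_equal_show_mpls_traffic_eng_tunnels_p2mp_totals := by
  intro sh_cmd_dict _
  unfold Spec_show_mpls_traffic_eng_tunnels_p2mp_totals
  simp only [show_mpls_traffic_eng_tunnels_p2mp_totals, show_mpls_traffic_eng_tunnels_p2mp_totals_alt]
  apply pv_main
  · exact PySem.Dict.nodup_keys_ofList _
  · exact pv_values_nodup sh_cmd_dict
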